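-- pv_equiv track=rewrite | github.com/PP-Chammo/chaamo-backend | src/match_engine.py | _get_bucket_from_percentage
-- ===== SOURCE A (Python) =====
-- from typing import Dict, List, Optional, Tuple
--
-- def _get_bucket_from_percentage(match_percentage: int) -> Optional[str]:
--     """Convert match_percentage to bucket, clipping to allowed buckets."""
--     allowed_buckets = [100, 90, 80, 70, 60, 50]
--
--     if match_percentage < 50:
--         return None
--
--     # Round down to nearest 10, then find the allowed bucket
--     rounded = (match_percentage // 10) * 10
--
--     # Find the highest allowed bucket that is <= rounded
--     for bucket in allowed_buckets:
--         if bucket <= rounded: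
--             return str(bucket)
--
--     return "50"  # Fallback
-- ===== SOURCE B (Python) =====
-- def _get_bucket_from_percentage(match_percentage: int):
--     """Convert match_percentage to bucket, clipping to allowed buckets."""
--     if match_percentage < 50:
--         return None
--     return str(min((match_percentage // 10) * 10, 100))
-- ===== Notes on version B (the rewrite author's own statement) =====
-- stated objective: simpler
-- what changed: Replaces the allowed-buckets list and the linear scan for the highest bucket <= rounded by a closed-form arithmetic clamp min((p//10)*10, 100), valid since buckets are contiguous multiples of 10 from 50 to 100.
import Mathlib
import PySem

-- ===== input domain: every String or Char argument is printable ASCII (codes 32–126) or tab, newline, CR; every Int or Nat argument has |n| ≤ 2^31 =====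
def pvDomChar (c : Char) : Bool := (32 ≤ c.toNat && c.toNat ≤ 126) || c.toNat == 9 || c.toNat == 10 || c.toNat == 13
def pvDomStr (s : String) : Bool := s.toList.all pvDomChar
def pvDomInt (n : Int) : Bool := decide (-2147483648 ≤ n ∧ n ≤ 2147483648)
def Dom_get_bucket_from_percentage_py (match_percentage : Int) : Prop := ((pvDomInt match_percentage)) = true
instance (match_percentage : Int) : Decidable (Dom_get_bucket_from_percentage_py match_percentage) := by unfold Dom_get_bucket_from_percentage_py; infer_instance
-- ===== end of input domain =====

-- ===== PORT A =====
-- B replaces the allowed-buckets list and linear scan with a closed-form clamp min((p//10)*10, 100).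
def get_bucket_from_percentage_py (match_percentage : Int) : Option String :=
  let allowed_buckets : List Int := [100, 90, 80, 70, 60, 50]
  if match_percentage < 50 then none
  else
    let rounded := (PySem.Int.floordiv match_percentage 10) * 10
    -- the for-loop returns at the first bucket with bucket ≤ rounded
    match allowed_buckets.find? (fun bucket => bucket ≤ rounded) with
    | some bucket => some (PySem.Int.toStr bucket)
    | none => some "50"

-- ===== PORT B =====
def get_bucket_from_percentage_py_alt (match_percentage : Int) : Option String :=
  if match_percentage < 50 then none
  else some (PySem.Int.toStr (min ((PySem.Int.floordiv match_percentage 10) * 10) 100))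

-- ===== PRECONDITION & SPEC =====
def Spec_get_bucket_from_percentage_py (match_percentage : Int) (out : Option String) : Prop := out = get_bucket_from_percentage_py_alt match_percentage
instance (match_percentage : Int) (out : Option String) : Decidable (Spec_get_bucket_from_percentage_py match_percentage out) := by unfold Spec_get_bucket_from_percentage_py; infer_instance

-- ===== CLAIM (what is proved, stated in full; the proofs are below) =====
def Claim_equal_get_bucket_from_percentage_py : Prop := ∀ (match_percentage : Int), Dom_get_bucket_from_percentage_py match_percentage → Spec_get_bucket_from_percentage_py match_percentage (get_bucket_from_percentage_py match_percentage)

-- ===== LEMMAS AND PROOFS =====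

-- ===== VERDICT (by name: the statement is the Claim_ definition above) =====
theorem get_bucket_from_percentage_py_spec : Claim_equal_get_bucket_from_percentage_py := by
  intro m _
  unfold Spec_get_bucket_from_percentage_py get_bucket_from_percentage_py get_bucket_from_percentage_py_alt
  by_cases h : m < 50
  · simp [h]
  · simp only [h, if_false]
    have hd : PySem.Int.floordiv m 10 = m / 10 := PySem.Int.floordiv_eq_ediv_of_pos (by omega)
    rw [hd]
    rcases (by omega : m / 10 = 5 ∨ m / 10 = 6 ∨ m / 10 = 7 ∨ m / 10 = 8 ∨ m / 10 = 9 ∨ 10 ≤ m / 10) with h5|h6|h7|h8|h9|hb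
    · rw [h5]; decide
    · rw [h6]; decide
    · rw [h7]; decide
    · rw [h8]; decide
    · rw [h9]; decide
    · have h100 : (100:Int) ≤ m / 10 * 10 := by omega
      rw [List.find?, min_eq_right h100]
      simp [h100]
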